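-- pv_equiv track=rewrite | github.com/leeht0113/codingtest_practice | 프로그래머스/1/92334. 신고 결과 받기/신고 결과 받기.py | solution
-- ===== SOURCE A (Python) =====
-- from collections import defaultdict
--
-- def solution(id_list, report, k):
--     answer = []
--     report_hash = defaultdict(set)
--     stoped = defaultdict(int)
--     for r in report:
--         a, b = r.split()
--         if b not in report_hash[a]:
--             stoped[b] += 1
--         report_hash[a].add(b)
--     for i in id_list:
--         mail = 0
--         for j in report_hash[i]:
--             if stoped[j] >= k:
--                 mail += 1
--         answer.append(mail)
--     return answer
-- ===== SOURCE B (Python) =====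
-- def solution(id_list, report, k):
--     # brute force over the distinct (reporter, reported) pairs: no hash maps or
--     # counters at all, just nested scans of the deduplicated pair set
--     pairs = {tuple(r.split()) for r in report}
--     return [sum(1 for a, b in pairs
--                 if a == i and sum(1 for _, d in pairs if d == b) >= k)
--             for i in id_list]
-- ===== Notes on version B (the rewrite author's own statement) =====
-- stated objective: simpler
-- what changed: Drops A's incrementally maintained hash structures (per-reporter defaultdict(set) and distinct-report counter built report by report, then a per-user loop over the user's set) in favour of a direct brute-force definition: deduplicate the (reporter, reported) pairs once and answer each user by nested scans of that pair set, recounting the reported user's distinct reports inline.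
import Mathlib
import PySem

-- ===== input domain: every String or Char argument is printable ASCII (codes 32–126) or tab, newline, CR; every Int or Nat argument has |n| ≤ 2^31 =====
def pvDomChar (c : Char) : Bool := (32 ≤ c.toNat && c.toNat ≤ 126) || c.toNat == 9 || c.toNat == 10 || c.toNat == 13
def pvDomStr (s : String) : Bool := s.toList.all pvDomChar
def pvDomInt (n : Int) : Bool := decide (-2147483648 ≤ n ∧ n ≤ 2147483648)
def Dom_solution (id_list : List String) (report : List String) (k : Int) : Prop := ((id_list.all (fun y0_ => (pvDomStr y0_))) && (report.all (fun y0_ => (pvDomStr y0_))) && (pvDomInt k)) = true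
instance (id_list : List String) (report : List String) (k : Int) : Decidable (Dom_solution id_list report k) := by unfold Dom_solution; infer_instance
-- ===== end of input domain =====

-- B replaces A's incrementally maintained hash structures (per-reporter set dict plus
-- distinct-report counter, then a per-user loop over the user's set) by a direct
-- brute-force nested scan of the deduplicated pair set (objective: simpler).

-- a, b = r.split()   (shared split step; exact under Pre_: split() yields exactly two words)
def pvPair (r : String) : String × String :=
  ((PySem.Str.split₀ r).getD 0 "", (PySem.Str.split₀ r).getD 1 "")

-- ===== PORT A =====
-- body of A's first loop, on the split pair: membership test, stoped[b] += 1, report_hash[a].add(b)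
def pvStepA (hs : PySem.Dict String (PySem.Set String) × PySem.Dict String Int)
    (p : String × String) : PySem.Dict String (PySem.Set String) × PySem.Dict String Int :=
  let cur := hs.1.getD p.1 PySem.Set.empty
  (hs.1.insert p.1 (PySem.Set.add cur p.2),
   if cur.contains p.2 then hs.2 else hs.2.modify p.2 0 (· + 1))

def solution (id_list : List String) (report : List String) (k : Int) : List Int :=
  let st := report.foldl (fun hs r => pvStepA hs (pvPair r)) (PySem.Dict.empty, PySem.Dict.empty)
  -- for i in id_list: mail = Σ over j in report_hash[i] of [stoped[j] >= k]
  id_list.map (fun i =>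
    (st.1.getD i PySem.Set.empty).foldl
      (fun mail j => if st.2.getD j 0 ≥ k then mail + 1 else mail) (0 : Int))

-- ===== PORT B =====
-- pairs = {tuple(r.split()) for r in report}; answer each user by nested scans of pairs
-- (the generator sums of 1s are counts of matching pairs, ported as countP)
def solution_alt (id_list : List String) (report : List String) (k : Int) : List Int :=
  let pairs : PySem.Set (String × String) := PySem.Set.ofList (report.map pvPair)
  id_list.map (fun i =>
    (pairs.countP (fun p =>
      p.1 == i && decide (k ≤ (pairs.countP (fun q => q.2 == p.2) : Int))) : Int))

-- ===== PRECONDITION & SPEC =====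
-- Pre_ excludes reports that do not split into exactly two words: there 'a, b = r.split()' raises ValueError.
def Pre_solution (id_list : List String) (report : List String) (k : Int) : Prop :=
  ∀ r ∈ report, (PySem.Str.split₀ r).length = 2
instance (id_list : List String) (report : List String) (k : Int) : Decidable (Pre_solution id_list report k) := by unfold Pre_solution; infer_instance
def pvWitness_solution : List String × List String × Int := (["muzi", "apeach"], ["muzi apeach", "apeach muzi"], 1)

def Spec_solution (id_list : List String) (report : List String) (k : Int) (out : List Int) : Prop := out = solution_alt id_list report k
instance (id_list : List String) (report : List String) (k : Int) (out : List Int) : Decidable (Spec_solution id_list report k out) := by unfold Spec_solution; infer_instance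

-- ===== CLAIM (what is proved, stated in full; the proofs are below) =====
def Claim_equal_solution : Prop := ∀ (id_list : List String) (report : List String) (k : Int), Dom_solution id_list report k → Pre_solution id_list report k → Spec_solution id_list report k (solution id_list report k)

-- ===== LEMMAS AND PROOFS =====

-- membership in a per-reporter set, read off the pair list
lemma pv_mem_snd_filter_fst (u : List (String × String)) (a b : String) :
    b ∈ (u.filter (fun p => p.1 == a)).map (fun p => p.2) ↔ (a, b) ∈ u := by
  simp only [List.mem_map, List.mem_filter, beq_iff_eq]
  constructor
  · rintro ⟨⟨x, y⟩, ⟨hm, rfl⟩, rfl⟩; exact hm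
  · intro h; exact ⟨(a, b), ⟨h, rfl⟩, rfl⟩

-- invariant of A's first loop, relative to the deduplicated pair list
lemma pv_loop_inv (ps : List (String × String))
    (h : PySem.Dict String (PySem.Set String)) (s : PySem.Dict String Int)
    (u : List (String × String))
    (H1 : ∀ a, h.getD a PySem.Set.empty = (u.filter (fun p => p.1 == a)).map (fun p => p.2))
    (H2 : ∀ b, s.getD b 0 = ((u.filter (fun p => p.2 == b)).length : Int)) :
    (∀ a, (ps.foldl pvStepA (h, s)).1.getD a PySem.Set.empty
        = ((ps.foldl PySem.Set.add u).filter (fun p => p.1 == a)).map (fun p => p.2)) ∧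
    (∀ b, (ps.foldl pvStepA (h, s)).2.getD b 0
        = (((ps.foldl PySem.Set.add u).filter (fun p => p.2 == b)).length : Int)) := by
  induction ps generalizing h s u with
  | nil => exact ⟨H1, H2⟩
  | cons p ps ih =>
    obtain ⟨a, b⟩ := p
    simp only [List.foldl_cons]
    have hcur : h.getD a PySem.Set.empty = (u.filter (fun p => p.1 == a)).map (fun p => p.2) := H1 a
    by_cases hmem : (a, b) ∈ u
    · have hb : b ∈ h.getD a PySem.Set.empty := by rw [hcur, pv_mem_snd_filter_fst]; exact hmem
      have hc : PySem.Set.contains (h.getD a PySem.Set.empty) b = true :=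
        (PySem.Set.contains_iff _ _).2 hb
      have hadd : PySem.Set.add u (a, b) = u := PySem.Set.add_of_mem hmem
      have ha : PySem.Set.add (h.getD a PySem.Set.empty) b = h.getD a PySem.Set.empty :=
        PySem.Set.add_of_mem hb
      have hstep : pvStepA (h, s) (a, b) = (h.insert a (h.getD a PySem.Set.empty), s) := by
        simp only [pvStepA, hc, if_true, ha]
      rw [hstep, hadd]
      apply ih
      · intro a'
        rw [PySem.Dict.getD_insert]
        split_ifs with he
        · subst he; exact hcur
        · exact H1 a'
      · exact H2
    · have hb : b ∉ h.getD a PySem.Set.empty := by rw [hcur, pv_mem_snd_filter_fst]; exact hmem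
      have hc : PySem.Set.contains (h.getD a PySem.Set.empty) b = false := by
        rw [← Bool.not_eq_true, PySem.Set.contains_iff]; exact hb
      have hadd : PySem.Set.add u (a, b) = u ++ [(a, b)] := PySem.Set.add_of_not_mem hmem
      have ha : PySem.Set.add (h.getD a PySem.Set.empty) b = h.getD a PySem.Set.empty ++ [b] :=
        PySem.Set.add_of_not_mem hb
      have hstep : pvStepA (h, s) (a, b)
          = (h.insert a (h.getD a PySem.Set.empty ++ [b]), s.modify b 0 (· + 1)) := by
        simp only [pvStepA, hc, Bool.false_eq_true, if_false, ha]
      rw [hstep, hadd]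
      apply ih
      · intro a'
        rw [PySem.Dict.getD_insert, List.filter_append, List.map_append, List.filter_singleton]
        by_cases he : a' = a
        · subst he
          simp only [eq_self_iff_true, if_true, beq_self_eq_true, cond_true, List.map_cons, List.map_nil]
          rw [List.append_cancel_right_eq]
          exact hcur
        · have he2 : ((a, b).1 == a') = false := by
            simp only [beq_eq_false_iff_ne, ne_eq]; exact fun hh => he hh.symm
          rw [if_neg he]
          simp only [he2, cond_false, List.map_nil, List.append_nil]
          exact H1 a'
      · intro b'
        rw [PySem.Dict.getD_modify, List.filter_append, List.length_append, List.filter_singleton]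
        by_cases he : b' = b
        · subst he
          simp only [eq_self_iff_true, if_true, beq_self_eq_true, cond_true, List.length_cons, List.length_nil]
          rw [H2 b']
          push_cast
          ring
        · have he2 : ((a, b).2 == b') = false := by
            simp only [beq_eq_false_iff_ne, ne_eq]; exact fun hh => he hh.symm
          rw [if_neg he]
          simp only [he2, cond_false, List.length_nil, Nat.add_zero]
          exact H2 b'

-- ===== VERDICT (by name: the statement is the Claim_ definition above) =====
theorem solution_spec : Claim_equal_solution := by
  intro id_list report k _hdom _hpre
  unfold Spec_solution solution solution_alt
  simp only []
  rw [show report.foldl (fun hs r => pvStepA hs (pvPair r)) (PySem.Dict.empty, PySem.Dict.empty)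
      = (report.map pvPair).foldl pvStepA (PySem.Dict.empty, PySem.Dict.empty) from List.foldl_map.symm]
  rw [PySem.Set.ofList_eq_foldl]
  obtain ⟨I1, I2⟩ := pv_loop_inv (report.map pvPair) PySem.Dict.empty PySem.Dict.empty []
    (by intro a; simp [PySem.Dict.getD_empty]) (by intro b; simp [PySem.Dict.getD_empty])
  apply List.map_congr_left
  intro i _
  rw [I1 i, PySem.List.foldl_ite_add_one, zero_add]
  rw [List.countP_map, List.countP_filter]
  norm_cast
  apply List.countP_congr
  intro p _
  have h2 := I2 p.2
  simp only [ge_iff_le, Function.comp_apply, h2, List.countP_eq_length_filter]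
  rw [Bool.and_comm]
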